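-- pv_equiv track=rewrite | github.com/karpiyeniamv/PyFiles | Main.py | func
-- ===== SOURCE A (Python) =====
-- def func (a,q):
--     b=[]
--     b=list (str(a))
--     c=[]
--     index=0
--     while (index<10):
--         c.append(0)
--         index=index+1
--     for i in b:
--         c[int(i)]=c[int(i)]+1
--     a=a*q
--
--     bb=[]
--     bb=list (str(a))
--     cc=[]
--     index=0
--     while (index<10):
--         cc.append(0)
--         index=index+1
--     for j in bb:
--         cc[int(j)]=cc[int(j)]+1
--     if (c==cc):
--         return 0
--     else:
--         return 1
-- ===== SOURCE B (Python) =====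
-- def func(a, q):
--     key_a = sorted(int(ch) for ch in str(a))
--     key_b = sorted(int(ch) for ch in str(a * q))
--     return 0 if key_a == key_b else 1
-- ===== Notes on version B (the rewrite author's own statement) =====
-- stated objective: simpler
-- what changed: Replaces the two hand-built 10-bucket frequency arrays (while-loop initialisation plus per-digit increments and an array compare) with sort-and-compare: the sorted digit lists of a and a*q are compared directly.
import Mathlib
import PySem

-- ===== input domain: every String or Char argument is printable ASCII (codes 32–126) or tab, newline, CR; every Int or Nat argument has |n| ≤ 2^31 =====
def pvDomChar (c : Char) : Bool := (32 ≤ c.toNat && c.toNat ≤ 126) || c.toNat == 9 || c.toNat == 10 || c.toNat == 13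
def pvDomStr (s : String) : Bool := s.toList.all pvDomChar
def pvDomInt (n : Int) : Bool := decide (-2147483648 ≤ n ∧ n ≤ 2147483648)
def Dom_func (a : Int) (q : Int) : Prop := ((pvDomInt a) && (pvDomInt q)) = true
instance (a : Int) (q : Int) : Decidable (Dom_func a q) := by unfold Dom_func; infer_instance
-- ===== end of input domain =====

-- B replaces A's two hand-built 10-bucket digit-frequency arrays with sorting the two
-- digit lists and comparing them (objective: simpler).

-- ===== PORT A =====
-- int(ch) for one character, total form: none (Python ValueError) ↦ 0.
-- Inside Pre_ every character of str(a)/str(a*q) is a digit, so none never occurs.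
def pvDigit (ch : Char) : Int := (PySem.Int.ofChars? [ch]).getD 0

-- the 'index=0; while index<10: c.append(0); index=index+1' loop
def pvZeros : Nat → List Int → List Int
  | 0, c => c
  | n + 1, c => pvZeros n (c ++ [0])

-- 'for i in b: c[int(i)] = c[int(i)] + 1'
def pvCountLoop (b : List Char) (c : List Int) : List Int :=
  b.foldl (fun c i => PySem.List.pySetD c (pvDigit i) (PySem.List.pyGetD c (pvDigit i) 0 + 1)) c

def func (a : Int) (q : Int) : Int :=
  let b := (PySem.Int.toChars a)
  let c := pvZeros 10 []
  let c := pvCountLoop b c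
  let a2 := a * q
  let bb := (PySem.Int.toChars a2)
  let cc := pvZeros 10 []
  let cc := pvCountLoop bb cc
  if c = cc then 0 else 1

-- ===== PORT B =====
def func_alt (a : Int) (q : Int) : Int :=
  let keyA := PySem.List.sorted ((PySem.Int.toChars a).map pvDigit) (fun x => x) false
  let keyB := PySem.List.sorted ((PySem.Int.toChars (a * q)).map pvDigit) (fun x => x) false
  if keyA = keyB then 0 else 1

-- ===== PRECONDITION & SPEC =====
-- Pre_ excludes exactly the inputs where Python A raises ValueError: a < 0 or a*q < 0
-- makes str(·) carry a '-' sign, and int('-') raises in A's counting loop.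
def Pre_func (a : Int) (q : Int) : Prop := 0 ≤ a ∧ 0 ≤ a * q
instance (a : Int) (q : Int) : Decidable (Pre_func a q) := by unfold Pre_func; infer_instance
def pvWitness_func : Int × Int := (12, 2)

def Spec_func (a : Int) (q : Int) (out : Int) : Prop := out = func_alt a q
instance (a : Int) (q : Int) (out : Int) : Decidable (Spec_func a q out) := by unfold Spec_func; infer_instance

-- ===== CLAIM (what is proved, stated in full; the proofs are below) =====
def Claim_equal_func : Prop := ∀ (a : Int) (q : Int), Dom_func a q → Pre_func a q → Spec_func a q (func a q)

-- ===== LEMMAS AND PROOFS =====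

-- the counting step of A's for-loop
def pvStep (c : List Int) (d : Int) : List Int :=
  PySem.List.pySetD c d (PySem.List.pyGetD c d 0 + 1)

theorem pvCountLoop_eq_foldl_map (b : List Char) (c : List Int) :
    pvCountLoop b c = (b.map pvDigit).foldl pvStep c := by
  simp [pvCountLoop, pvStep, List.foldl_map]

theorem pvStep_length (c : List Int) (d : Int) : (pvStep c d).length = c.length := by
  simp [pvStep, PySem.List.length_pySetD]

theorem pvFoldl_length (l : List Int) : ∀ c : List Int, (l.foldl pvStep c).length = c.length := by
  induction l with
  | nil => intro c; rfl
  | cons d t ih => intro c; simp [List.foldl_cons, ih, pvStep_length]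

theorem pvFoldl_getElem? (l : List Int) : ∀ (c : List Int), c.length = 10 →
    (∀ d ∈ l, 0 ≤ d ∧ d < 10) → ∀ (k : Nat), k < 10 →
    (l.foldl pvStep c)[k]? = some (c.getD k 0 + l.count (k : Int)) := by
  induction l with
  | nil =>
    intro c hc _ k hk
    simp [List.getElem?_eq_getElem (by omega : k < c.length)]
  | cons d t ih =>
    intro c hc hl k hk
    have hd := hl d (List.mem_cons_self ..)
    have hset : pvStep c d = c.set d.toNat (c.getD d.toNat 0 + 1) := by
      rw [pvStep, PySem.List.pySetD_of_nonneg c _ hd.1,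
        PySem.List.pyGetD_eq_getElem c 0 hd.1 (by omega),
        List.getD_eq_getElem c 0 (by omega : d.toNat < c.length)]
    rw [List.foldl_cons, ih _ (by simp [hset, hc]) (fun x hx => hl x (List.mem_cons_of_mem _ hx)) k hk]
    congr 1
    rw [List.count_cons, hset,
      List.getD_eq_getElem _ 0 (by simp; omega : k < (c.set d.toNat (c.getD d.toNat 0 + 1)).length),
      List.getElem_set, List.getD_eq_getElem c 0 (by omega : k < c.length)]
    by_cases he : d.toNat = k
    · have hbe : (d == (k : Int)) = true := by simp; omega
      rw [if_pos he, List.getD_eq_getElem c 0 (by omega : d.toNat < c.length)]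
      simp [he, hbe]
      omega
    · have hbe : (d == (k : Int)) = false := by simp; omega
      rw [if_neg he, hbe]
      simp

theorem pvCount_eq_iff (l1 l2 : List Int)
    (h1 : ∀ d ∈ l1, 0 ≤ d ∧ d < 10) (h2 : ∀ d ∈ l2, 0 ≤ d ∧ d < 10) :
    l1.foldl pvStep (pvZeros 10 []) = l2.foldl pvStep (pvZeros 10 []) ↔ l1.Perm l2 := by
  have hz : (pvZeros 10 []).length = 10 := by decide
  rw [List.perm_iff_count]
  constructor
  · intro heq x
    by_cases hx : 0 ≤ x ∧ x < 10
    · have hk : x.toNat < 10 := by omega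
      have e1 := pvFoldl_getElem? l1 _ hz h1 x.toNat hk
      have e2 := pvFoldl_getElem? l2 _ hz h2 x.toNat hk
      rw [heq, e2] at e1
      have hcast : ((x.toNat : Nat) : Int) = x := by omega
      rw [hcast] at e1
      simp only [Option.some.injEq] at e1
      omega
    · have c1 : l1.count x = 0 := List.count_eq_zero.2 (fun hm => hx (h1 x hm))
      have c2 : l2.count x = 0 := List.count_eq_zero.2 (fun hm => hx (h2 x hm))
      rw [c1, c2]
  · intro hcnt
    apply List.ext_getElem?
    intro k
    by_cases hk : k < 10
    · rw [pvFoldl_getElem? l1 _ hz h1 k hk, pvFoldl_getElem? l2 _ hz h2 k hk, hcnt]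
    · rw [List.getElem?_eq_none (by rw [pvFoldl_length]; omega),
        List.getElem?_eq_none (by rw [pvFoldl_length]; omega)]

-- every character Nat.toDigits 10 produces is a digitChar k with k < 10
theorem pv_mem_toDigitsCore : ∀ (fuel n : Nat) (ds : List Char) (c : Char),
    c ∈ Nat.toDigitsCore 10 fuel n ds → c ∈ ds ∨ ∃ k, k < 10 ∧ c = Nat.digitChar k := by
  intro fuel
  induction fuel with
  | zero => intro n ds c h; exact Or.inl h
  | succ f ih =>
    intro n ds c h
    rw [Nat.toDigitsCore] at h
    by_cases hz : n / 10 = 0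
    · simp only [hz] at h
      rcases List.mem_cons.1 h with h | h
      · exact Or.inr ⟨n % 10, Nat.mod_lt _ (by omega), h⟩
      · exact Or.inl h
    · simp only [if_neg hz] at h
      rcases ih (n / 10) _ c h with h | h
      · rcases List.mem_cons.1 h with h | h
        · exact Or.inr ⟨n % 10, Nat.mod_lt _ (by omega), h⟩
        · exact Or.inl h
      · exact Or.inr h

theorem pvDigit_digitChar (k : Nat) (hk : k < 10) :
    0 ≤ pvDigit (Nat.digitChar k) ∧ pvDigit (Nat.digitChar k) < 10 := by
  interval_cases k <;> decide

theorem pvDigit_range (a : Int) (ha : 0 ≤ a) :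
    ∀ d ∈ (PySem.Int.toChars a).map pvDigit, 0 ≤ d ∧ d < 10 := by
  intro d hd
  rcases List.mem_map.1 hd with ⟨c, hc, rfl⟩
  have : c ∈ Nat.toDigits 10 a.toNat := by
    rwa [PySem.Int.toChars, if_neg (by omega)] at hc
  rcases pv_mem_toDigitsCore _ _ _ _ this with h | ⟨k, hk, rfl⟩
  · cases h
  · exact pvDigit_digitChar k hk

-- ===== VERDICT (by name: the statement is the Claim_ definition above) =====
theorem func_spec : Claim_equal_func := by
  intro a q _ hpre
  show func a q = func_alt a q
  have h1 := pvDigit_range a hpre.1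
  have h2 := pvDigit_range (a * q) hpre.2
  have key : (pvCountLoop (PySem.Int.toChars a) (pvZeros 10 []) =
        pvCountLoop (PySem.Int.toChars (a * q)) (pvZeros 10 [])) ↔
      (PySem.List.sorted ((PySem.Int.toChars a).map pvDigit) (fun x => x) false =
        PySem.List.sorted ((PySem.Int.toChars (a * q)).map pvDigit) (fun x => x) false) := by
    rw [pvCountLoop_eq_foldl_map, pvCountLoop_eq_foldl_map,
      pvCount_eq_iff _ _ h1 h2, PySem.List.sorted_id_eq_sorted_id_iff_perm]
  simp only [func, func_alt]
  split_ifs with hA hB hB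
  · rfl
  · exact absurd (key.1 hA) hB
  · exact absurd (key.2 hB) hA
  · rfl
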